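-- pv_equiv track=rewrite | github.com/SKywa1kerr/BioAgent | backend/core/alignment.py | trim_ab1_by_quality
-- ===== SOURCE A (Python) =====
-- def trim_ab1_by_quality(seq: str, qual: list[int], qmin=20, min_len=80):
--     """Keep the longest contiguous region with quality >= qmin.
--     Returns (trimmed_seq, trimmed_qual).
--     """
--     if not qual or len(qual) != len(seq):
--         return seq, qual
--
--     good = [1 if q >= qmin else 0 for q in qual]
--     best_l, best_r = 0, -1
--     cur_l = None
--
--     for i, g in enumerate(good):
--         if g and cur_l is None:
--             cur_l = i
--         if (not g or i == len(good) - 1) and cur_l is not None: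
--             cur_r = i if g else i - 1
--             if cur_r - cur_l + 1 > best_r - best_l + 1:
--                 best_l, best_r = cur_l, cur_r
--             cur_l = None
--
--     if best_r >= best_l and (best_r - best_l + 1) >= min_len:
--         return seq[best_l:best_r + 1], qual[best_l:best_r + 1]
--     return seq, qual
-- ===== SOURCE B (Python) =====
-- def trim_ab1_by_quality(seq: str, qual: list[int], qmin=20, min_len=80):
--     """Keep the longest contiguous region with quality >= qmin.
--     Returns (trimmed_seq, trimmed_qual).
--     """
--     if not qual or len(qual) != len(seq):
--         return seq, qual
--
--     # Collect every maximal run of good positions as (start, end) pairs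
--     # with a two-pointer sweep, then pick the best run afterwards.
--     n = len(qual)
--     runs = []
--     i = 0
--     while i < n:
--         if qual[i] >= qmin:
--             j = i
--             while j + 1 < n and qual[j + 1] >= qmin:
--                 j += 1
--             runs.append((i, j))
--             i = j + 1
--         else:
--             i += 1
--
--     if not runs:
--         return seq, qual
--     l, r = max(runs, key=lambda p: p[1] - p[0] + 1)
--     if r - l + 1 >= min_len:
--         return seq[l:r + 1], qual[l:r + 1]
--     return seq, qual
-- ===== Notes on version B (the rewrite author's own statement) =====
-- stated objective: alternative
-- what changed: Replaces A's single stateful scan (best-so-far plus pending-run-start flags with a last-index special case) by a build-all-maximal-runs two-pointer sweep followed by max(runs, key=length) first-wins selection.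
import Mathlib
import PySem

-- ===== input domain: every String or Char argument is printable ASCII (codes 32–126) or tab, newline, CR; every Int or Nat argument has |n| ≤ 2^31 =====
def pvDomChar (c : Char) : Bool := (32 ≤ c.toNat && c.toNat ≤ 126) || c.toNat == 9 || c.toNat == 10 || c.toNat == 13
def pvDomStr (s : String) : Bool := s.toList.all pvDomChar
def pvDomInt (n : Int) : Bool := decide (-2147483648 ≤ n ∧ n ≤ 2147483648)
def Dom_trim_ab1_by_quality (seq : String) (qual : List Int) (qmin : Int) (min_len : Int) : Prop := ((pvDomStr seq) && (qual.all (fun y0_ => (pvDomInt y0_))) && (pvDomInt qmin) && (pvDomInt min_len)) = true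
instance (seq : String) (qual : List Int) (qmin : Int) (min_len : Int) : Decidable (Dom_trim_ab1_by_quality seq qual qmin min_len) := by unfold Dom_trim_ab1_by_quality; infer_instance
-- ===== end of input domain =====

-- B replaces A's single stateful best-so-far scan by a two-pointer sweep that collects all
-- maximal good runs and then selects the first longest with max(runs, key=length); same cost.

-- ===== PORT A =====
-- the comprehension body `1 if q >= qmin else 0`
def goodFlag (qmin q : Int) : Int := if qmin ≤ q then 1 else 0

-- the body of A's `for i, g in enumerate(good)` loop, acting on ((best_l, best_r), cur_l)
def stepA (n : Nat) (st : (Int × Int) × Option Int) (p : Int × Int) : (Int × Int) × Option Int :=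
  let i := p.1
  let g := p.2
  let cur := if g ≠ 0 ∧ st.2 = none then some i else st.2
  if (g = 0 ∨ i = (n : Int) - 1) ∧ cur ≠ none then
    let cl := cur.getD 0
    let cr := if g ≠ 0 then i else i - 1
    if cr - cl + 1 > st.1.2 - st.1.1 + 1 then ((cl, cr), none) else (st.1, none)
  else (st.1, cur)

def trim_ab1_by_quality (seq : String) (qual : List Int) (qmin : Int) (min_len : Int) : String × List Int :=
  if qual = [] ∨ (qual.length : Int) ≠ PySem.Str.len seq then (seq, qual)
  else
    let good := qual.map (goodFlag qmin)
    let st := (PySem.List.enumerate good 0).foldl (stepA good.length) ((0, -1), none)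
    let bl := st.1.1
    let br := st.1.2
    if bl ≤ br ∧ min_len ≤ br - bl + 1 then
      (PySem.Str.slice seq (some bl) (some (br + 1)), PySem.List.slice qual (some bl) (some (br + 1)))
    else (seq, qual)

-- ===== PORT B =====
-- B's inner `while j + 1 < n and qual[j + 1] >= qmin: j += 1`
def runEndB (qual : List Int) (qmin : Int) (j : Nat) : Nat :=
  if _h : j + 1 < qual.length ∧ qmin ≤ qual.getD (j + 1) 0 then runEndB qual qmin (j + 1) else j
termination_by qual.length - j

-- termination helper for buildRunsB (cited in its decreasing_by)
theorem le_runEndB (qual : List Int) (qmin : Int) (j : Nat) : j ≤ runEndB qual qmin j := by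
  unfold runEndB
  split
  · exact le_trans (Nat.le_succ j) (le_runEndB qual qmin (j + 1))
  · exact le_refl j
termination_by qual.length - j

-- B's outer `while i < n` two-pointer sweep, collecting the maximal runs
def buildRunsB (qual : List Int) (qmin : Int) (i : Nat) : List (Nat × Nat) :=
  if h : i < qual.length then
    if qmin ≤ qual.getD i 0 then
      let j := runEndB qual qmin i
      (i, j) :: buildRunsB qual qmin (j + 1)
    else buildRunsB qual qmin (i + 1)
  else []
termination_by qual.length - i
decreasing_by
  · have := le_runEndB qual qmin i; omega
  · omega

def trim_ab1_by_quality_alt (seq : String) (qual : List Int) (qmin : Int) (min_len : Int) : String × List Int :=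
  if qual = [] ∨ (qual.length : Int) ≠ PySem.Str.len seq then (seq, qual)
  else
    let runs := buildRunsB qual qmin 0
    match PySem.List.max? runs (fun p => ((p.2 : Int) - (p.1 : Int) + 1)) with
    | none => (seq, qual)
    | some (l, r) =>
      if min_len ≤ (r : Int) - (l : Int) + 1 then
        (PySem.Str.slice seq (some (l : Int)) (some ((r : Int) + 1)),
         PySem.List.slice qual (some (l : Int)) (some ((r : Int) + 1)))
      else (seq, qual)

-- ===== PRECONDITION & SPEC =====
def Spec_trim_ab1_by_quality (seq : String) (qual : List Int) (qmin : Int) (min_len : Int) (out : String × List Int) : Prop := out = trim_ab1_by_quality_alt seq qual qmin min_len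
instance (seq : String) (qual : List Int) (qmin : Int) (min_len : Int) (out : String × List Int) : Decidable (Spec_trim_ab1_by_quality seq qual qmin min_len out) := by unfold Spec_trim_ab1_by_quality; infer_instance

-- ===== CLAIM (what is proved, stated in full; the proofs are below) =====
def Claim_equal_trim_ab1_by_quality : Prop := ∀ (seq : String) (qual : List Int) (qmin : Int) (min_len : Int), Dom_trim_ab1_by_quality seq qual qmin min_len → Spec_trim_ab1_by_quality seq qual qmin min_len (trim_ab1_by_quality seq qual qmin min_len)

-- ===== LEMMAS AND PROOFS =====
-- A's strict best-so-far improvement, on Int pairs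
def impZ (b p : Int × Int) : Int × Int := if p.2 - p.1 + 1 > b.2 - b.1 + 1 then p else b
-- the same improvement on Nat pairs (the shape of B's max(runs, key=...))
def impN (b p : Nat × Nat) : Nat × Nat := if ((b.2 : Int) - (b.1 : Int) + 1) < ((p.2 : Int) - (p.1 : Int) + 1) then p else b
def castP (p : Nat × Nat) : Int × Int := ((p.1 : Int), (p.2 : Int))

theorem runEndB_lt (qual : List Int) (qmin : Int) (j : Nat) (h : j < qual.length) :
    runEndB qual qmin j < qual.length := by
  unfold runEndB
  split
  · exact runEndB_lt qual qmin (j + 1) (by omega)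
  · exact h
termination_by qual.length - j

theorem runEndB_stop (qual : List Int) (qmin : Int) (j : Nat) :
    ¬ (runEndB qual qmin j + 1 < qual.length ∧ qmin ≤ qual.getD (runEndB qual qmin j + 1) 0) := by
  unfold runEndB
  split
  · exact runEndB_stop qual qmin (j + 1)
  · assumption
termination_by qual.length - j

theorem runEndB_succ (qual : List Int) (qmin : Int) (j : Nat)
    (h : j + 1 < qual.length ∧ qmin ≤ qual.getD (j + 1) 0) :
    runEndB qual qmin j = runEndB qual qmin (j + 1) := by
  conv_lhs => unfold runEndB
  rw [dif_pos h]

theorem runEndB_base (qual : List Int) (qmin : Int) (j : Nat)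
    (h : ¬ (j + 1 < qual.length ∧ qmin ≤ qual.getD (j + 1) 0)) :
    runEndB qual qmin j = j := by
  conv_lhs => unfold runEndB
  rw [dif_neg h]

-- step computations
theorem stepA_none_bad (n : Nat) (b : Int × Int) (i : Int) :
    stepA n (b, none) (i, 0) = (b, none) := by
  simp [stepA]

theorem stepA_some_bad (n : Nat) (b : Int × Int) (l i : Int) :
    stepA n (b, some l) (i, 0) = (impZ b (l, i - 1), none) := by
  simp [stepA, impZ]
  split <;> rfl

theorem stepA_some_good_mid (n : Nat) (b : Int × Int) (l i : Int) (h : i ≠ (n : Int) - 1) :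
    stepA n (b, some l) (i, 1) = (b, some l) := by
  simp [stepA, h]

theorem stepA_some_good_last (n : Nat) (b : Int × Int) (l i : Int) (h : i = (n : Int) - 1) :
    stepA n (b, some l) (i, 1) = (impZ b (l, i), none) := by
  simp [stepA, h, impZ]
  split <;> rfl

theorem stepA_start (n : Nat) (b : Int × Int) (i : Int) :
    stepA n (b, none) (i, 1) = stepA n (b, some i) (i, 1) := by
  simp [stepA]

-- the pending-run phase of A's scan closes exactly at runEndB
theorem pendA (qual : List Int) (qmin : Int) (l : Int) (b : Int × Int) (k : Nat)
    (hk : k < qual.length) (hg : qmin ≤ qual.getD k 0) :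
    (PySem.List.enumerate ((qual.drop k).map (goodFlag qmin)) (k : Int)).foldl (stepA qual.length) (b, some l)
      = (PySem.List.enumerate ((qual.drop (runEndB qual qmin k + 2)).map (goodFlag qmin)) ((runEndB qual qmin k : Int) + 2)).foldl (stepA qual.length) (impZ b (l, (runEndB qual qmin k : Int)), none) := by
  have hg1 : goodFlag qmin (qual[k]) = 1 := by
    unfold goodFlag
    rw [if_pos]
    rwa [List.getD_eq_getElem qual 0 hk] at hg
  by_cases hnext : k + 1 < qual.length ∧ qmin ≤ qual.getD (k + 1) 0
  · -- interior of the run: the step leaves the state unchanged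
    rw [List.drop_eq_getElem_cons hk]
    simp only [List.map_cons, PySem.List.enumerate_cons, List.foldl_cons, hg1]
    rw [stepA_some_good_mid _ _ _ _ (by have := hnext.1; omega)]
    rw [runEndB_succ qual qmin k hnext]
    have ih := pendA qual qmin l b (k + 1) hnext.1 hnext.2
    push_cast at ih ⊢
    exact ih
  · rw [runEndB_base qual qmin k hnext]
    rcases Nat.lt_or_ge (k + 1) qual.length with hlt | hge
    · -- next position exists and is bad: the run closes there
      have hbad : ¬ qmin ≤ qual.getD (k + 1) 0 := fun hh => hnext ⟨hlt, hh⟩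
      have hb0 : goodFlag qmin (qual[k + 1]) = 0 := by
        unfold goodFlag
        rw [if_neg]
        rwa [List.getD_eq_getElem qual 0 hlt] at hbad
      rw [List.drop_eq_getElem_cons hk, List.drop_eq_getElem_cons hlt]
      simp only [List.map_cons, PySem.List.enumerate_cons, List.foldl_cons, hg1, hb0]
      rw [stepA_some_good_mid _ _ _ _ (by omega)]
      rw [stepA_some_bad]
      have harith : ((k : Int) + 1 - 1) = (k : Int) := by omega
      rw [harith]
      ring_nf
    · -- k is the last index: the run closes at the end of the list
      have hklast : (k : Int) = (qual.length : Int) - 1 := by omega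
      have hdrop : qual.drop (k + 1) = [] := List.drop_eq_nil_of_le (by omega)
      have hdrop2 : qual.drop (k + 2) = [] := List.drop_eq_nil_of_le (by omega)
      rw [List.drop_eq_getElem_cons hk, hdrop, hdrop2]
      simp only [List.map_cons, List.map_nil, PySem.List.enumerate_cons, PySem.List.enumerate_nil,
        List.foldl_cons, List.foldl_nil, hg1]
      rw [stepA_some_good_last _ _ _ _ hklast]
termination_by qual.length - k

-- A's whole scan computes the strict-first fold of the runs list
theorem scanA (qual : List Int) (qmin : Int) (b : Int × Int) (i : Nat) :
    (PySem.List.enumerate ((qual.drop i).map (goodFlag qmin)) (i : Int)).foldl (stepA qual.length) (b, none)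
      = (((buildRunsB qual qmin i).map castP).foldl impZ b, none) := by
  by_cases hi : i < qual.length
  · by_cases hgood : qmin ≤ qual.getD i 0
    · have hg1 : goodFlag qmin (qual[i]) = 1 := by
        unfold goodFlag
        rw [if_pos]
        rwa [List.getD_eq_getElem qual 0 hi] at hgood
      have hkey : (PySem.List.enumerate ((qual.drop i).map (goodFlag qmin)) (i : Int)).foldl (stepA qual.length) (b, none)
          = (PySem.List.enumerate ((qual.drop i).map (goodFlag qmin)) (i : Int)).foldl (stepA qual.length) (b, some (i : Int)) := by
        rw [List.drop_eq_getElem_cons hi]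
        simp only [List.map_cons, PySem.List.enumerate_cons, List.foldl_cons, hg1]
        rw [stepA_start]
      rw [hkey, pendA qual qmin (i : Int) b i hi hgood]
      have hstop := runEndB_stop qual qmin i
      have hle := le_runEndB qual qmin i
      set j := runEndB qual qmin i with hj
      have hruns : buildRunsB qual qmin (j + 1) = buildRunsB qual qmin (j + 2) := by
        rcases Nat.lt_or_ge (j + 1) qual.length with h1 | h1
        · have hb : ¬ qmin ≤ qual.getD (j + 1) 0 := fun hh => hstop ⟨h1, hh⟩
          conv_lhs => unfold buildRunsB
          rw [dif_pos h1, if_neg hb]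
        · conv_lhs => unfold buildRunsB
          rw [dif_neg (by omega)]
          conv_lhs => rw [show ([] : List (Nat × Nat)) = buildRunsB qual qmin (j + 2) by
            unfold buildRunsB; rw [dif_neg (by omega)]]
      have ih := scanA qual qmin (impZ b ((i : Int), (j : Int))) (j + 2)
      push_cast at ih ⊢
      rw [ih]
      conv_rhs => unfold buildRunsB
      rw [dif_pos hi, if_pos hgood]
      simp only [List.map_cons, List.foldl_cons, ← hj, hruns]
      rfl
    · have hg0 : goodFlag qmin (qual[i]) = 0 := by
        unfold goodFlag
        rw [if_neg]
        rwa [List.getD_eq_getElem qual 0 hi] at hgood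
      rw [List.drop_eq_getElem_cons hi]
      simp only [List.map_cons, PySem.List.enumerate_cons, List.foldl_cons, hg0]
      rw [stepA_none_bad]
      have ih := scanA qual qmin b (i + 1)
      push_cast at ih ⊢
      rw [ih]
      conv_rhs => unfold buildRunsB
      rw [dif_pos hi, if_neg hgood]
  · rw [List.drop_eq_nil_of_le (by omega)]
    conv_rhs => unfold buildRunsB
    rw [dif_neg hi]
    rfl
termination_by qual.length - i
decreasing_by
  · exact Nat.sub_lt_sub_left hi (by have := le_runEndB qual qmin i; omega)
  · exact Nat.sub_lt_sub_left hi (by omega)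

theorem buildRunsB_wf (qual : List Int) (qmin : Int) (i : Nat) :
    ∀ p ∈ buildRunsB qual qmin i, p.1 ≤ p.2 := by
  fun_induction buildRunsB qual qmin i with
  | case1 i h hg j ih =>
    intro p hp
    rcases List.mem_cons.mp hp with h1 | h1
    · subst h1; exact le_runEndB qual qmin i
    · exact ih p h1
  | case2 i h hg ih => exact ih
  | case3 i h => intro p hp; simp at hp

theorem foldl_impN_wf (t : List (Nat × Nat)) (x : Nat × Nat) (hx : x.1 ≤ x.2)
    (ht : ∀ p ∈ t, p.1 ≤ p.2) : (t.foldl impN x).1 ≤ (t.foldl impN x).2 := by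
  induction t generalizing x with
  | nil => exact hx
  | cons p t ih =>
    simp only [List.foldl_cons]
    refine ih (impN x p) ?_ (fun q hq => ht q (List.mem_cons_of_mem _ hq))
    unfold impN
    split
    · exact ht p (List.mem_cons_self)
    · exact hx

theorem impZ_cast (x p : Nat × Nat) : impZ (castP x) (castP p) = castP (impN x p) := by
  rcases x with ⟨a, b⟩; rcases p with ⟨c, d⟩
  unfold impZ impN castP
  split_ifs <;> rfl

theorem foldl_impZ_cast (t : List (Nat × Nat)) (x : Nat × Nat) :
    (t.map castP).foldl impZ (castP x) = castP (t.foldl impN x) := by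
  induction t generalizing x with
  | nil => rfl
  | cons p t ih =>
    simp only [List.map_cons, List.foldl_cons]
    rw [impZ_cast]
    exact ih (impN x p)

theorem max?_foldl_some {α : Type} (key : α → Int) (t : List α) (m : α) :
    t.foldl (fun acc x => match acc with
      | none => some x
      | some m => if key m < key x then some x else some m) (some m)
      = some (t.foldl (fun m x => if key m < key x then x else m) m) := by
  induction t generalizing m with
  | nil => rfl
  | cons p t ih =>
    simp only [List.foldl_cons]
    split <;> rw [ih]

theorem max?_cons (key : (Nat × Nat) → Int) (x : Nat × Nat) (t : List (Nat × Nat)) :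
    PySem.List.max? (x :: t) key = some (t.foldl (fun m p => if key m < key p then p else m) x) := by
  unfold PySem.List.max?
  simp only [List.foldl_cons]
  exact max?_foldl_some key t x

-- ===== VERDICT (by name: the statement is the Claim_ definition above) =====
theorem trim_ab1_by_quality_spec : Claim_equal_trim_ab1_by_quality := by
  intro seq qual qmin min_len _
  unfold Spec_trim_ab1_by_quality trim_ab1_by_quality trim_ab1_by_quality_alt
  by_cases h0 : qual = [] ∨ (qual.length : Int) ≠ PySem.Str.len seq
  · rw [if_pos h0, if_pos h0]
  · rw [if_neg h0, if_neg h0]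
    have hscan := scanA qual qmin ((0 : Int), (-1 : Int)) 0
    simp only [List.drop_zero, Nat.cast_zero] at hscan
    simp only [List.length_map]
    rw [hscan]
    cases hR : buildRunsB qual qmin 0 with
    | nil =>
      simp only [List.map_nil, List.foldl_nil, PySem.List.max?]
      rw [if_neg (by intro h; exact absurd h.1 (by norm_num))]
    | cons x t =>
      have hwf := buildRunsB_wf qual qmin 0
      rw [hR] at hwf
      have hx : x.1 ≤ x.2 := hwf x List.mem_cons_self
      rw [max?_cons]
      have hfirst : impZ ((0 : Int), (-1 : Int)) (castP x) = castP x := by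
        unfold impZ castP
        rw [if_pos (by simp only; omega)]
      have hA : (((x :: t).map castP).foldl impZ ((0 : Int), (-1 : Int))) = castP (t.foldl impN x) := by
        rw [List.map_cons, List.foldl_cons, hfirst, foldl_impZ_cast]
      rw [hA]
      have hbN : (t.foldl (fun m p => if ((fun p => ((p.2 : Int) - (p.1 : Int) + 1)) m) < ((fun p => ((p.2 : Int) - (p.1 : Int) + 1)) p) then p else m) x) = t.foldl impN x := rfl
      rw [hbN]
      have hm12 : (t.foldl impN x).1 ≤ (t.foldl impN x).2 :=
        foldl_impN_wf t x hx (fun p hp => hwf p (List.mem_cons_of_mem _ hp))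
      cases hEq : t.foldl impN x with
      | mk l r =>
        rw [hEq] at hm12
        simp only at hm12
        simp only [castP]
        by_cases hml : min_len ≤ (r : Int) - (l : Int) + 1
        · rw [if_pos ⟨by exact_mod_cast hm12, hml⟩]
          simp only [hml, if_true]
        · rw [if_neg (fun h => hml h.2)]
          simp only [hml, if_false]
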